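-- pv_equiv track=rewrite | github.com/vssrcj/hnefatafl-game | src/game_utils.py | is_surrounded
-- ===== SOURCE A (Python) =====
-- def is_surrounded(u, r, d, l):
--     friend_side = False
--     sides_surrounded = 0
--
--     for x in (u, r, d, l):
--         if x == 1:
--             sides_surrounded += 1
--         elif x == 2 and not friend_side:
--             sides_surrounded += 1
--             friend_side = True
--
--     return sides_surrounded == 4
-- ===== SOURCE B (Python) =====
-- def is_surrounded(u, r, d, l):
--     # Surrounded iff the multiset of sides is {1,1,1,1} or {1,1,1,2}:
--     # sort and compare against the two canonical patterns.
--     return sorted((u, r, d, l)) in ([1, 1, 1, 1], [1, 1, 1, 2])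
-- ===== Notes on version B (the rewrite author's own statement) =====
-- stated objective: alternative
-- what changed: Replaces A's accumulator loop with friend_side flag by a sort-and-pattern-match: the four sides sorted must equal one of the two canonical patterns [1,1,1,1] or [1,1,1,2].
import Mathlib
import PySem

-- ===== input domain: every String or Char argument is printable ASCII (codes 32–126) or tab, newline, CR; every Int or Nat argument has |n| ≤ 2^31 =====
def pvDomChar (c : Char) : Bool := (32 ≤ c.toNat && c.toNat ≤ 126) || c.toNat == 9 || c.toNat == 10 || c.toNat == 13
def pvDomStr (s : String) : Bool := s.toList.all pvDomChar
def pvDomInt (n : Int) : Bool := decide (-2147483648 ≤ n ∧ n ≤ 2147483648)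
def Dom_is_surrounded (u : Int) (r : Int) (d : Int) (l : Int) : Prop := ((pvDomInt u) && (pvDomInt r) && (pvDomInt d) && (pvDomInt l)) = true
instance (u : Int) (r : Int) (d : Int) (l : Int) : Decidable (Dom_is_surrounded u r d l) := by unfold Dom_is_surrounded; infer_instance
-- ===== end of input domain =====

-- ===== PORT A =====
-- A: loop over the four sides with a counter and a friend_side flag.
def is_surrounded (u : Int) (r : Int) (d : Int) (l : Int) : Bool :=
  let st := [u, r, d, l].foldl (fun (s : Bool × Int) (x : Int) =>
    let (friend_side, sides_surrounded) := s
    if x = 1 then (friend_side, sides_surrounded + 1)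
    else if x = 2 ∧ friend_side = false then (true, sides_surrounded + 1)
    else (friend_side, sides_surrounded)) ((false, (0:Int)))
  st.2 == 4

-- ===== PORT B =====
-- B: sort the four sides and compare against the two canonical patterns (alternative algorithm).
def is_surrounded_alt (u : Int) (r : Int) (d : Int) (l : Int) : Bool :=
  let s := PySem.List.sorted [u, r, d, l] (fun x => x) false
  s == [1, 1, 1, 1] || s == [1, 1, 1, 2]

-- ===== PRECONDITION & SPEC =====
def Spec_is_surrounded (u : Int) (r : Int) (d : Int) (l : Int) (out : Bool) : Prop := out = is_surrounded_alt u r d l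
instance (u : Int) (r : Int) (d : Int) (l : Int) (out : Bool) : Decidable (Spec_is_surrounded u r d l out) := by unfold Spec_is_surrounded; infer_instance

-- ===== CLAIM (what is proved, stated in full; the proofs are below) =====
def Claim_equal_is_surrounded : Prop := ∀ (u : Int) (r : Int) (d : Int) (l : Int), Dom_is_surrounded u r d l → Spec_is_surrounded u r d l (is_surrounded u r d l)

-- ===== LEMMAS AND PROOFS =====

-- sorted(xs) = ys, for a weakly increasing ys, is exactly "xs is a permutation of ys"
theorem pv_sorted_eq_iff (xs ys : List Int) (h : ys.Pairwise (fun a b => a ≤ b)) :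
    PySem.List.sorted xs (fun x => x) false = ys ↔ xs.Perm ys := by
  constructor
  · intro he
    have hp := PySem.List.sorted_perm xs (fun x => x) false
    rw [he] at hp
    exact hp.symm
  · intro hp
    exact PySem.List.sorted_id_eq_of_perm_of_pairwise xs ys hp.symm h

theorem pv_perm1111 (a b c d : Int) :
    [a, b, c, d].Perm [1, 1, 1, 1] ↔ (a = 1 ∧ b = 1 ∧ c = 1 ∧ d = 1) := by
  rw [show ([1, 1, 1, 1] : List Int) = List.replicate 4 (1 : Int) from rfl, List.perm_replicate]
  simp [List.replicate]

theorem pv_perm1112 (a b c d : Int) :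
    [a, b, c, d].Perm [1, 1, 1, 2] ↔
      ((a = 2 ∧ b = 1 ∧ c = 1 ∧ d = 1) ∨ (a = 1 ∧ b = 2 ∧ c = 1 ∧ d = 1) ∨
       (a = 1 ∧ b = 1 ∧ c = 2 ∧ d = 1) ∨ (a = 1 ∧ b = 1 ∧ c = 1 ∧ d = 2)) := by
  constructor
  · intro hp
    have ha : a = 1 ∨ a = 2 := by have := hp.mem_iff (a := a); simp at this; tauto
    have hb : b = 1 ∨ b = 2 := by have := hp.mem_iff (a := b); simp at this; tauto
    have hc : c = 1 ∨ c = 2 := by have := hp.mem_iff (a := c); simp at this; tauto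
    have hd : d = 1 ∨ d = 2 := by have := hp.mem_iff (a := d); simp at this; tauto
    have h2 := hp.count_eq 2
    rcases ha with ha | ha <;> rcases hb with hb | hb <;>
    rcases hc with hc | hc <;> rcases hd with hd | hd <;>
    simp_all
  · rintro (⟨rfl, rfl, rfl, rfl⟩ | ⟨rfl, rfl, rfl, rfl⟩ | ⟨rfl, rfl, rfl, rfl⟩ | ⟨rfl, rfl, rfl, rfl⟩) <;> decide

-- ===== VERDICT (by name: the statement is the Claim_ definition above) =====
theorem is_surrounded_spec : Claim_equal_is_surrounded := by
  intro u r d l _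
  unfold Spec_is_surrounded is_surrounded is_surrounded_alt
  rw [Bool.eq_iff_iff]
  simp only [List.foldl, Bool.or_eq_true, beq_iff_eq,
    pv_sorted_eq_iff [u, r, d, l] [1, 1, 1, 1] (by decide),
    pv_sorted_eq_iff [u, r, d, l] [1, 1, 1, 2] (by decide),
    pv_perm1111, pv_perm1112]
  by_cases hu1 : u = 1 <;> by_cases hu2 : u = 2 <;>
  by_cases hr1 : r = 1 <;> by_cases hr2 : r = 2 <;>
  by_cases hd1 : d = 1 <;> by_cases hd2 : d = 2 <;>
  by_cases hl1 : l = 1 <;> by_cases hl2 : l = 2 <;>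
  simp_all
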